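-- pv_equiv track=rewrite | github.com/lucy3/grounding-embeddings | subgraphs/pearson_corr.py | augment_concept_stats
-- ===== SOURCE A (Python) =====
-- def augment_concept_stats(concept_stats, concept_domains):
--     """
--     Augment concept_stats dictionary with domain information.
--     """
--     # Build a canonicalized format for the domain space.
--     all_domains = list(sorted(set([item for sublist in concept_domains.values()
--         for item in sublist])))
--
--     ret = {}
--     for concept in concept_stats:
--         concept_domain = concept_domains.get(concept, None)
--         domains = [0 if concept_domain is None or domain not in concept_domain
--             else 1 for domain in all_domains]
--         ret[concept] = concept_stats[concept] + tuple(domains)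
--
--     return ret, all_domains
-- ===== SOURCE B (Python) =====
-- def augment_concept_stats(concept_stats, concept_domains):
--     """
--     Augment concept_stats dictionary with domain information.
--     """
--     # Sort all mentioned domains once, then drop duplicates keeping first occurrences.
--     items = sorted(d for sublist in concept_domains.values() for d in sublist)
--     all_domains = list(dict.fromkeys(items))
--     pos = {domain: i for i, domain in enumerate(all_domains)}
--     n = len(all_domains)
--
--     def vec_for(concept):
--         vec = [0] * n
--         for d in concept_domains.get(concept, ()):
--             vec[pos[d]] = 1
--         return tuple(vec)
--
--     return {c: stats + vec_for(c) for c, stats in concept_stats.items()}, all_domains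
-- ===== Notes on version B (the rewrite author's own statement) =====
-- stated objective: faster
-- what changed: B sorts the flattened domain list and deduplicates it (dict.fromkeys) instead of sorting a set, then builds a domain-to-position index once and fills a preallocated zero vector by a pass over each concept's own (small) domain list via a dict comprehension, instead of A's per-concept scan over all_domains with a list-membership test per domain.
import Mathlib
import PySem

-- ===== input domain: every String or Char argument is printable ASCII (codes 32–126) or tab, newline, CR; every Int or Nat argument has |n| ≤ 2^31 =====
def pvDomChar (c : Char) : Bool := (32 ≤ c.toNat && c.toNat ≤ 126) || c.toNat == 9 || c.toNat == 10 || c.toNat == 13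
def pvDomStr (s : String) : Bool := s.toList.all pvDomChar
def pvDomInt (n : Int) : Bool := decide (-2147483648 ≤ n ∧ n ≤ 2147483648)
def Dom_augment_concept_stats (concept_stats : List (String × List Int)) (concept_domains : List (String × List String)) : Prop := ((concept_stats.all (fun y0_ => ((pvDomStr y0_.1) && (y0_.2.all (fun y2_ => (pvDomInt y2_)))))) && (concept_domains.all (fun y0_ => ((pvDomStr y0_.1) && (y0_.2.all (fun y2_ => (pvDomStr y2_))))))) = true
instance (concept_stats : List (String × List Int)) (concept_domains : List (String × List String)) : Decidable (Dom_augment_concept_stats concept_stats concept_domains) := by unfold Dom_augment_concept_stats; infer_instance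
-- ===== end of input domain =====

-- B sorts the flattened domain list then deduplicates adjacent-free via dict.fromkeys, builds a
-- domain→position index once, and fills a preallocated zero vector per concept by a pass over that
-- concept's own domain list (dict comprehension) instead of A's per-concept scan over all_domains
-- (objective: faster).


-- ===== PORT A =====
def augment_concept_stats (concept_stats : List (String × List Int)) (concept_domains : List (String × List String)) : (List (String × List Int)) × List String :=
  let all_domains := PySem.List.sorted
    (PySem.Set.ofList ((PySem.Dict.mk concept_domains).values.flatMap (fun sublist => sublist)))
    (fun x => x) false
  let ret := concept_stats.foldl (fun r p =>
    let concept_domain := (PySem.Dict.mk concept_domains).get? p.1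
    let domains := all_domains.map (fun domain =>
      if concept_domain.elim true (fun l => !l.contains domain) then (0 : Int) else 1)
    r ++ [(p.1, p.2 ++ domains)]) []
  (ret, all_domains)

-- ===== PORT B =====
def augment_concept_stats_alt (concept_stats : List (String × List Int)) (concept_domains : List (String × List String)) : (List (String × List Int)) × List String :=
  let items := PySem.List.sorted
    ((PySem.Dict.mk concept_domains).values.flatMap (fun sublist => sublist)) (fun d => d) false
  let all_domains := PySem.List.dedup items
  let pos := (PySem.List.enumerate all_domains 0).foldl
    (fun d p => d.insert p.2 p.1) PySem.Dict.empty
  let n := all_domains.length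
  let vec_for := fun (concept : String) =>
    ((PySem.Dict.mk concept_domains).getD concept []).foldl (fun v d =>
      match pos.get? d with  -- total guard: every listed domain occurs in all_domains, so get? never misses
      | some i => v.set i.toNat 1
      | none => v) (List.replicate n (0 : Int))
  (concept_stats.map (fun p => (p.1, p.2 ++ vec_for p.1)), all_domains)

-- ===== PRECONDITION & SPEC =====
def Spec_augment_concept_stats (concept_stats : List (String × List Int)) (concept_domains : List (String × List String)) (out : (List (String × List Int)) × List String) : Prop := out = augment_concept_stats_alt concept_stats concept_domains
instance (concept_stats : List (String × List Int)) (concept_domains : List (String × List String)) (out : (List (String × List Int)) × List String) : Decidable (Spec_augment_concept_stats concept_stats concept_domains out) := by unfold Spec_augment_concept_stats; infer_instance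

-- ===== CLAIM (what is proved, stated in full; the proofs are below) =====
def Claim_equal_augment_concept_stats : Prop := ∀ (concept_stats : List (String × List Int)) (concept_domains : List (String × List String)), Dom_augment_concept_stats concept_stats concept_domains → Spec_augment_concept_stats concept_stats concept_domains (augment_concept_stats concept_stats concept_domains)

-- ===== LEMMAS AND PROOFS =====

-- set(xs) keeps first occurrences in order, hence is a sublist of xs.
lemma ofList_sublist (xs : List String) : List.Sublist (PySem.Set.ofList xs) xs := by
  induction xs with
  | nil => simp [PySem.Set.ofList]
  | cons x xs ih =>
    rw [PySem.Set.ofList_cons]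
    refine List.Sublist.cons₂ x (List.Sublist.trans ?_ ih)
    simp only [PySem.Set.discard]
    exact List.filter_sublist

-- B's all_domains (dedup of the sorted mention list) equals A's (sorted set of mentions).
lemma all_domains_eq (items : List String) :
    PySem.List.dedup (PySem.List.sorted items (fun d => d) false)
      = PySem.List.sorted (PySem.Set.ofList items) (fun x => x) false := by
  rw [PySem.List.dedup_eq_ofList]
  refine PySem.List.eq_of_perm_of_pairwise_le_of_injective (fun x : String => x)
    (fun a b h => h) ?_ ?_ ?_
  · refine (List.perm_ext_iff_of_nodup (PySem.Set.nodup_ofList _)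
      (((PySem.List.sorted_perm _ _ _).nodup_iff).mpr (PySem.Set.nodup_ofList _))).mpr ?_
    intro a
    rw [PySem.Set.mem_ofList, PySem.List.mem_sorted, PySem.List.mem_sorted, PySem.Set.mem_ofList]
  · exact List.Pairwise.sublist (ofList_sublist _) (PySem.List.sorted_pairwise _ _)
  · exact PySem.List.sorted_pairwise _ _

-- The position dict built from `enumerate xs` looks up the index of x in xs (unique when xs is Nodup).
lemma get?_enumFold (xs : List String) (s : Int) (d0 : PySem.Dict String Int) (x : String) (hn : xs.Nodup) :
    ((PySem.List.enumerate xs s).foldl (fun d p => d.insert p.2 p.1) d0).get? x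
      = if x ∈ xs then some (s + (xs.idxOf x : Int)) else d0.get? x := by
  induction xs generalizing s d0 with
  | nil => simp [PySem.List.enumerate_nil]
  | cons a xs ih =>
    rw [PySem.List.enumerate_cons, List.foldl_cons]
    rcases List.nodup_cons.mp hn with ⟨ha, hxs⟩
    by_cases hx : x = a
    · subst hx
      rw [ih _ _ hxs, if_neg ha, PySem.Dict.get?_insert_self]
      simp [List.idxOf_cons_self]
    · rw [ih _ _ hxs, PySem.Dict.get?_insert_of_ne _ _ hx]
      by_cases hm : x ∈ xs
      · rw [if_pos hm, if_pos (List.mem_cons_of_mem a hm), List.idxOf_cons_ne _ (Ne.symm hx)]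
        push_cast
        ring_nf
      · rw [if_neg hm, if_neg (by simp [hx, hm])]

-- A fold that sets positions to 1 reads back 1 exactly at the touched in-range positions.
lemma foldl_set_getElem? (l : List String) (f : String → Nat) (v0 : List Int) (i : Nat) :
    (l.foldl (fun v d => v.set (f d) 1) v0)[i]?
      = if i < v0.length ∧ ∃ d ∈ l, f d = i then some 1 else v0[i]? := by
  induction l generalizing v0 with
  | nil => simp
  | cons d l ih =>
    rw [List.foldl_cons, ih]
    by_cases hi : i < v0.length
    · by_cases hl : ∃ d' ∈ l, f d' = i
      · simp [hi, hl]
      · by_cases hd : f d = i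
        · simp [hi, hl, hd]
        · simp [hi, hl, hd]
    · simp [hi]

-- A's per-concept 0/1 indicator map over all_domains equals B's position-setting fold, for a present concept.
lemma per_concept_some (cd : List (String × List String)) (c : String) (l : List String)
    (h : (PySem.Dict.mk cd).get? c = some l) :
    (PySem.List.sorted (PySem.Set.ofList ((PySem.Dict.mk cd).values.flatMap (fun sublist => sublist))) (fun x => x) false).map
        (fun domain => if !l.contains domain then (0 : Int) else 1)
      = l.foldl (fun v d =>
          match ((PySem.List.enumerate (PySem.List.sorted (PySem.Set.ofList ((PySem.Dict.mk cd).values.flatMap (fun sublist => sublist))) (fun x => x) false) 0).foldl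
              (fun d p => d.insert p.2 p.1) PySem.Dict.empty).get? d with
          | some i => v.set i.toNat 1
          | none => v)
          (List.replicate (PySem.List.sorted (PySem.Set.ofList ((PySem.Dict.mk cd).values.flatMap (fun sublist => sublist))) (fun x => x) false).length (0 : Int)) := by
  set all := PySem.List.sorted (PySem.Set.ofList ((PySem.Dict.mk cd).values.flatMap (fun sublist => sublist))) (fun x => x) false with hall
  have hnd : all.Nodup := (PySem.List.sorted_perm _ _ _).symm.nodup (PySem.Set.nodup_ofList _)
  have hitems : (c, l) ∈ cd := PySem.Dict.mem_items_of_get?_eq_some _ h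
  have hsub : ∀ d ∈ l, d ∈ all := by
    intro d hd
    rw [hall, PySem.List.mem_sorted, PySem.Set.mem_ofList, List.mem_flatMap]
    exact ⟨l, List.mem_map_of_mem hitems, hd⟩
  have hpos : ∀ d ∈ l, ((PySem.List.enumerate all 0).foldl (fun d p => d.insert p.2 p.1) PySem.Dict.empty).get? d
      = some ((all.idxOf d : Nat) : Int) := by
    intro d hd
    rw [get?_enumFold all 0 _ d hnd, if_pos (hsub d hd), zero_add]
  rw [PySem.List.foldl_congr_mem l _ (fun (v : List Int) d => v.set (all.idxOf d) 1) _
    (by intro v d hd; rw [hpos d hd]; simp)]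
  apply List.ext_getElem?
  intro i
  rw [foldl_set_getElem?, List.getElem?_map]
  by_cases hi : i < all.length
  · have hex : (∃ d ∈ l, all.idxOf d = i) ↔ all[i] ∈ l := by
      constructor
      · rintro ⟨d, hd, hdi⟩
        have hdeq : all[i] = d := by
          subst hdi
          exact List.getElem_idxOf (List.idxOf_lt_length_of_mem (hsub d hd))
        rw [hdeq]; exact hd
      · intro hm
        exact ⟨all[i], hm, List.Nodup.idxOf_getElem hnd i hi⟩
    rw [List.getElem?_eq_getElem hi]
    by_cases hm : all[i] ∈ l
    · simp [hi, hex, hm]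
    · simp [hi, hex, hm]
  · simp [hi]

-- ===== VERDICT (by name: the statement is the Claim_ definition above) =====
theorem augment_concept_stats_spec : Claim_equal_augment_concept_stats := by
  intro cs cd _
  unfold Spec_augment_concept_stats augment_concept_stats augment_concept_stats_alt
  simp only [all_domains_eq]
  rw [Prod.mk.injEq]
  refine ⟨?_, rfl⟩
  rw [PySem.List.foldl_append_singleton_eq_map]
  apply List.map_congr_left
  intro p _
  simp only [Prod.mk.injEq, true_and, List.append_cancel_left_eq]
  cases h : (PySem.Dict.mk cd).get? p.1 with
  | none =>
    rw [PySem.Dict.getD_eq_get?_getD, h]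
    simp [Option.elim, List.map_const']
  | some l =>
    rw [PySem.Dict.getD_eq_get?_getD, h, Option.getD_some]
    have := per_concept_some cd p.1 l h
    simp only [Option.elim]
    exact this
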